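-- pv_equiv track=rewrite | github.com/alanpelayoo/coding-interview-practice | Python/excr27jun.py | retrieveWords
-- ===== SOURCE A (Python) =====
-- def retrieveWords(string):
--     vowels_l = ["A","E","I","O","U"]
--     kevin = []
--     stuart =[]
--     for letter in string:
--         if letter in vowels_l:
--             if letter not in kevin:
--                 kevin.append(letter)
--         else:
--             if letter not in stuart:
--                 stuart.append(letter)
--     return kevin,stuart
-- ===== SOURCE B (Python) =====
-- def retrieveWords(string):
--     vowels = ["A", "E", "I", "O", "U"]
--     uniq = list(dict.fromkeys(string))
--     kevin = [c for c in uniq if c in vowels]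
--     stuart = [c for c in uniq if c not in vowels]
--     return kevin, stuart
-- ===== Notes on version B (the rewrite author's own statement) =====
-- stated objective: simpler
-- what changed: B dedupes the whole string once with dict.fromkeys (first-appearance order) and then partitions the deduped sequence into vowels and consonants by two filters, instead of A's single loop that interleaves a per-character membership test against the growing kevin/stuart output lists.
import Mathlib
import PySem

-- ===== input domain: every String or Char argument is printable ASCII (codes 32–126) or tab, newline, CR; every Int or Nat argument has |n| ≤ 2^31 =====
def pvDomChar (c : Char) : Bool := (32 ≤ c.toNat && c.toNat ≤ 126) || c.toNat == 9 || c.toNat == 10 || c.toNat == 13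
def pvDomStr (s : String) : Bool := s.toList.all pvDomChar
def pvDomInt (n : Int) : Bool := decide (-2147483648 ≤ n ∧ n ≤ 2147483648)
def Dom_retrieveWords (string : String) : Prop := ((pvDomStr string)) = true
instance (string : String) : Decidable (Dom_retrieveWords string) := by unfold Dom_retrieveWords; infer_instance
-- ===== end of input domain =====

-- B dedupes the string once (dict.fromkeys order) and then partitions the deduped
-- sequence into vowels / consonants by two filters, instead of A's interleaved
-- per-character membership tests against the growing output lists; objective: simpler.

-- ===== PORT A =====
-- iterating a Python string yields 1-character strings
def pvCharStr (c : Char) : String := String.ofList [c]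

def pvVowels : List String := ["A", "E", "I", "O", "U"]

-- A's loop: state (kevin, stuart), branches in A's order
def retrieveWordsLoop : List Char → List String → List String → List String × List String
  | [], kevin, stuart => (kevin, stuart)
  | c :: rest, kevin, stuart =>
    let letter := pvCharStr c
    if pvVowels.contains letter then
      if kevin.contains letter then retrieveWordsLoop rest kevin stuart
      else retrieveWordsLoop rest (kevin ++ [letter]) stuart
    else
      if stuart.contains letter then retrieveWordsLoop rest kevin stuart
      else retrieveWordsLoop rest kevin (stuart ++ [letter])

def retrieveWords (string : String) : List String × List String :=
  retrieveWordsLoop string.toList [] []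

-- ===== PORT B =====
def retrieveWords_alt (string : String) : List String × List String :=
  let uniq := PySem.List.dedup (string.toList.map pvCharStr)
  (uniq.filter (fun c => pvVowels.contains c),
   uniq.filter (fun c => !pvVowels.contains c))

-- ===== PRECONDITION & SPEC =====
def Spec_retrieveWords (string : String) (out : List String × List String) : Prop := out = retrieveWords_alt string
instance (string : String) (out : List String × List String) : Decidable (Spec_retrieveWords string out) := by unfold Spec_retrieveWords; infer_instance

-- ===== CLAIM (what is proved, stated in full; the proofs are below) =====
def Claim_equal_retrieveWords : Prop := ∀ (string : String), Dom_retrieveWords string → Spec_retrieveWords string (retrieveWords string)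

-- ===== LEMMAS AND PROOFS =====

-- "fresh elements appended by a dedup pass that has already seen `seen`"
def pvDD (seen : List String) : List String → List String
  | [] => []
  | t :: r =>
    if seen.contains t then pvDD (PySem.Set.add seen t) r
    else t :: pvDD (PySem.Set.add seen t) r

theorem pvSet_add_of_mem (s : List String) (t : String) (h : t ∈ s) :
    PySem.Set.add s t = s := by
  simp [PySem.Set.add, PySem.Set.contains, h]

theorem pvSet_add_of_not_mem (s : List String) (t : String) (h : t ∉ s) :
    PySem.Set.add s t = s ++ [t] := by
  simp [PySem.Set.add, PySem.Set.contains, h]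

theorem pvDD_congr (X : List String) : ∀ s1 s2 : List String,
    (∀ u ∈ X, (u ∈ s1 ↔ u ∈ s2)) → pvDD s1 X = pvDD s2 X := by
  induction X with
  | nil => intro s1 s2 _; simp [pvDD]
  | cons t r ih =>
    intro s1 s2 h
    have ht := h t (by simp)
    have hrec : pvDD (PySem.Set.add s1 t) r = pvDD (PySem.Set.add s2 t) r := by
      apply ih
      intro u hu
      simp [PySem.Set.mem_add, h u (by simp [hu]), ht]
    by_cases h1 : t ∈ s1
    · have h2 : t ∈ s2 := ht.mp h1
      rw [pvSet_add_of_mem _ _ h1, pvSet_add_of_mem _ _ h2] at hrec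
      simp [pvDD, h1, h2, hrec]
    · have h2 : t ∉ s2 := fun hx => h1 (ht.mpr hx)
      rw [pvSet_add_of_not_mem _ _ h1, pvSet_add_of_not_mem _ _ h2] at hrec
      simp [pvDD, h1, h2, hrec]

theorem pvLoop_eq (cs : List Char) : ∀ (k s : List String),
    retrieveWordsLoop cs k s =
      (k ++ pvDD k ((cs.map pvCharStr).filter (fun t => pvVowels.contains t)),
       s ++ pvDD s ((cs.map pvCharStr).filter (fun t => !pvVowels.contains t))) := by
  induction cs with
  | nil => intro k s; simp [retrieveWordsLoop, pvDD]
  | cons c rest ih =>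
    intro k s
    by_cases hv : pvCharStr c ∈ pvVowels
    · by_cases hk : pvCharStr c ∈ k
      · simp [retrieveWordsLoop, hv, hk, ih, pvDD, pvSet_add_of_mem _ _ hk]
      · simp [retrieveWordsLoop, hv, hk, ih, pvDD,
          pvSet_add_of_not_mem _ _ hk, List.append_assoc]
    · by_cases hs : pvCharStr c ∈ s
      · simp [retrieveWordsLoop, hv, hs, ih, pvDD, pvSet_add_of_mem _ _ hs]
      · simp [retrieveWordsLoop, hv, hs, ih, pvDD,
          pvSet_add_of_not_mem _ _ hs, List.append_assoc]

theorem pvFilter_ofList_aux (p : String → Bool) (L : List String) : ∀ (acc : List String),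
    (L.foldl PySem.Set.add acc).filter p = acc.filter p ++ pvDD acc (L.filter p) := by
  induction L with
  | nil => intro acc; simp [pvDD]
  | cons t r ih =>
    intro acc
    by_cases hc : t ∈ acc
    · by_cases hp : p t = true
      · simp [List.foldl, ih, pvDD, hc, hp, pvSet_add_of_mem _ _ hc]
      · rw [Bool.not_eq_true] at hp
        simp [List.foldl, ih, pvDD, hc, hp, pvSet_add_of_mem _ _ hc]
    · by_cases hp : p t = true
      · simp [List.foldl, ih, pvDD, hc, hp, pvSet_add_of_not_mem _ _ hc,
          List.filter_append, List.append_assoc]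
      · rw [Bool.not_eq_true] at hp
        have hcong : pvDD (acc ++ [t]) (r.filter p) = pvDD acc (r.filter p) := by
          apply pvDD_congr
          intro u hu
          have hne : u ≠ t := by
            intro he; rw [he] at hu
            have := List.of_mem_filter hu
            simp [hp] at this
          simp [hne]
        simp [List.foldl, ih, hp, pvSet_add_of_not_mem _ _ hc,
          List.filter_append, hcong]

theorem pvFilter_ofList (p : String → Bool) (L : List String) :
    (PySem.Set.ofList L).filter p = pvDD [] (L.filter p) := by
  rw [PySem.Set.ofList_eq_foldl, pvFilter_ofList_aux]
  simp

-- ===== VERDICT (by name: the statement is the Claim_ definition above) =====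
theorem retrieveWords_spec : Claim_equal_retrieveWords := by
  intro string _
  show retrieveWordsLoop string.toList [] [] = _
  rw [pvLoop_eq]
  simp only [retrieveWords_alt, PySem.List.dedup_eq_ofList, List.nil_append,
    pvFilter_ofList]
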